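-- pv_equiv track=rewrite | github.com/Mylloon/KassouBot | src/utils/core.py | ligneFormatage
-- ===== SOURCE A (Python) =====
-- def ligneFormatage(ligne):
--     """Traduit en français les balises dans les lyrics d'une chanson"""
--     liste_balise = [
--         ('[Hook', '[Accroche'), ('[Verse', '[Couplet'), ('[Chorus', '[Chœur'),
--         ('[Bridge', '[Pont'),('[Pre-Chorus', '[Pré-chœur'), ('[Post-Chorus', '[Post-chœur')
--     ]
--     for balises in liste_balise:
--         ligne = ligne.replace(balises[0], balises[1])
--     return ligne
-- ===== SOURCE B (Python) =====
-- def ligneFormatage(ligne):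
--     """Traduit en français les balises dans les lyrics d'une chanson"""
--     tags = {
--         'Hook': 'Accroche', 'Verse': 'Couplet', 'Chorus': 'Chœur',
--         'Bridge': 'Pont', 'Pre-Chorus': 'Pré-chœur', 'Post-Chorus': 'Post-chœur',
--     }
--     out = []
--     i = 0
--     n = len(ligne)
--     while i < n:
--         c = ligne[i]
--         if c == '[':
--             for k, v in tags.items():
--                 if ligne.startswith(k, i + 1):
--                     out.append('[' + v)
--                     i += 1 + len(k)
--                     break
--             else:
--                 out.append('[')
--                 i += 1
--         else:
--             out.append(c)
--             i += 1
--     return ''.join(out)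
-- ===== Notes on version B (the rewrite author's own statement) =====
-- stated objective: alternative
-- what changed: Replaces six sequential full-string str.replace passes (each building a new string) by a single left-to-right scan that, at each opening bracket, dispatches on a tag table and copies all other characters through once.
import Mathlib
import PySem

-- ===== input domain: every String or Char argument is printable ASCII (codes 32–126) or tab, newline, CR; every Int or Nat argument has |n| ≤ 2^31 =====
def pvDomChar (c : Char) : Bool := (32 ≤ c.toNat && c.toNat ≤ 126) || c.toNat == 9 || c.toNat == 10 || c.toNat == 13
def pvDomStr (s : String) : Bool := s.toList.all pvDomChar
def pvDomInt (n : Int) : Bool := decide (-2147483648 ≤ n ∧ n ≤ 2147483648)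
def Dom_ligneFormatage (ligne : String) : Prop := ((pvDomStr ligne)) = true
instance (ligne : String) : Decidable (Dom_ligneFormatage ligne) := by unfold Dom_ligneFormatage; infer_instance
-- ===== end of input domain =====

-- B replaces A's six sequential full-string replace passes by a single left-to-right scan
-- dispatching on a tag table at each '[' (objective: alternative, one traversal instead of six).

-- ===== PORT A =====
def ligneFormatage (ligne : String) : String :=
  let liste_balise : List (String × String) :=
    [("[Hook", "[Accroche"), ("[Verse", "[Couplet"), ("[Chorus", "[Chœur"),
     ("[Bridge", "[Pont"), ("[Pre-Chorus", "[Pré-chœur"), ("[Post-Chorus", "[Post-chœur")]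
  liste_balise.foldl (fun l balises => PySem.Str.replace l balises.1 balises.2) ligne

-- ===== PORT B =====
-- Source B's tag table: tag name after '[' ↦ French replacement after '['
def pvTags : List (List Char × List Char) :=
  [("Hook".toList, "Accroche".toList), ("Verse".toList, "Couplet".toList),
   ("Chorus".toList, "Chœur".toList), ("Bridge".toList, "Pont".toList),
   ("Pre-Chorus".toList, "Pré-chœur".toList), ("Post-Chorus".toList, "Post-chœur".toList)]

-- Source B's while loop: one pass over the characters; at '[' try the table, else copy the char
def bScan : List Char → List Char
  | [] => []
  | c :: t =>
    if c = '[' then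
      match pvTags.find? (fun p => p.1.isPrefixOf t) with
      | some (k, v) => '[' :: (v ++ bScan (t.drop k.length))
      | none => '[' :: bScan t
    else c :: bScan t
  termination_by l => l.length
  decreasing_by all_goals (simp [List.length_drop]; try omega)

def ligneFormatage_alt (ligne : String) : String := String.ofList (bScan ligne.toList)

-- ===== PRECONDITION & SPEC =====
def Spec_ligneFormatage (ligne : String) (out : String) : Prop := out = ligneFormatage_alt ligne
instance (ligne : String) (out : String) : Decidable (Spec_ligneFormatage ligne out) := by unfold Spec_ligneFormatage; infer_instance

-- ===== CLAIM (what is proved, stated in full; the proofs are below) =====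
def Claim_equal_ligneFormatage : Prop := ∀ (ligne : String), Dom_ligneFormatage ligne → Spec_ligneFormatage ligne (ligneFormatage ligne)

-- ===== LEMMAS AND PROOFS =====

-- single-pattern scan with fuel: PySem.Chars.replace.go without the reversed accumulator
def scan1F (old nw : List Char) : Nat → List Char → List Char
  | 0, l => l
  | _ + 1, [] => []
  | fuel + 1, c :: t =>
    if old.isPrefixOf (c :: t) then nw ++ scan1F old nw fuel ((c :: t).drop old.length)
    else c :: scan1F old nw fuel t

def Rscan (old nw l : List Char) : List Char := scan1F old nw l.length l

-- multi-pattern scan with fuel (first matching key of K wins)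
def multiF (K : List (List Char × List Char)) : Nat → List Char → List Char
  | 0, l => l
  | _ + 1, [] => []
  | fuel + 1, c :: t =>
    match K.find? (fun p => p.1.isPrefixOf (c :: t)) with
    | some (k, v) => v ++ multiF K fuel ((c :: t).drop k.length)
    | none => c :: multiF K fuel t

def Mscan (K : List (List Char × List Char)) (l : List Char) : List Char := multiF K l.length l

-- well-formed tag table: keys and values start with '[' and contain no further '['
def GoodK (K : List (List Char × List Char)) : Prop :=
  ∀ p ∈ K, p.1.head? = some '[' ∧ '[' ∉ p.1.tail ∧ p.2.head? = some '[' ∧ '[' ∉ p.2.tail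

lemma go_eq_scan1F (old nw : List Char) :
    ∀ (fuel : Nat) (l acc : List Char),
      PySem.Chars.replace.go old nw fuel l acc = acc.reverse ++ scan1F old nw fuel l := by
  intro fuel
  induction fuel with
  | zero => intro l acc; rw [PySem.Chars.replace.go]; simp [scan1F]
  | succ f ih =>
    intro l acc
    cases l with
    | nil => rw [PySem.Chars.replace.go]; simp [scan1F]; omega
    | cons c t =>
      rw [PySem.Chars.replace.go]
      by_cases h : old.isPrefixOf (c :: t)
      · simp only [h, if_true, scan1F, ih]; simp
      · simp only [h, if_false, scan1F, ih]
        simp only [Bool.not_eq_true] at h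
        simp [h]

lemma replace_eq_scan1F (s old nw : List Char) (ho : old ≠ []) :
    PySem.Chars.replace s old nw = scan1F old nw s.length s := by
  rw [PySem.Chars.replace]
  simp [List.isEmpty_eq_false_iff.mpr ho, go_eq_scan1F]

lemma scan1F_fuel (old nw : List Char) (ho : old ≠ []) :
    ∀ (fuel : Nat) (l : List Char), l.length ≤ fuel → scan1F old nw fuel l = Rscan old nw l := by
  intro fuel
  induction fuel using Nat.strong_induction_on with
  | _ fuel ih =>
    intro l hl
    match fuel, l with
    | 0, l =>
      have : l = [] := by cases l <;> simp_all
      simp [this, scan1F, Rscan]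
    | f + 1, [] => simp [scan1F, Rscan]
    | f + 1, c :: t =>
      have ht : t.length ≤ f := by simpa using hl
      show scan1F old nw (f + 1) (c :: t) = scan1F old nw (t.length + 1) (c :: t)
      have hol : 1 ≤ old.length := by cases old <;> simp_all
      by_cases h : old.isPrefixOf (c :: t)
      · simp only [scan1F, h, if_true]
        have hd : ((c :: t).drop old.length).length ≤ t.length := by
          simp [List.length_drop]; omega
        rw [ih f (by omega) _ (le_trans hd ht), ih t.length (by omega) _ hd]
      · simp only [scan1F, h]
        rw [ih f (by omega) _ ht, ih t.length (by omega) _ le_rfl]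
        simp

lemma Rscan_nil (old nw : List Char) : Rscan old nw [] = [] := by simp [Rscan, scan1F]

lemma Rscan_cons (old nw : List Char) (ho : old ≠ []) (c : Char) (t : List Char) :
    Rscan old nw (c :: t) =
      if old.isPrefixOf (c :: t) then nw ++ Rscan old nw ((c :: t).drop old.length)
      else c :: Rscan old nw t := by
  show scan1F old nw (t.length + 1) (c :: t) = _
  have hol : 1 ≤ old.length := by cases old <;> simp_all
  by_cases h : old.isPrefixOf (c :: t)
  · simp only [scan1F, h, if_true]
    rw [scan1F_fuel old nw ho t.length _ (by simp [List.length_drop]; omega)]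
  · simp only [scan1F, h]
    rw [scan1F_fuel old nw ho t.length _ le_rfl]
    simp

lemma replace_eq_Rscan (s old nw : List Char) (ho : old ≠ []) :
    PySem.Chars.replace s old nw = Rscan old nw s := replace_eq_scan1F s old nw ho

lemma strrepS (s old nw : String) (ho : old.toList ≠ []) :
    PySem.Str.replace s old nw = String.ofList (Rscan old.toList nw.toList s.toList) := by
  rw [PySem.Str.replace, replace_eq_Rscan _ _ _ ho]

lemma strrepT (s old nw : String) (ho : old.toList ≠ []) :
    (PySem.Str.replace s old nw).toList = Rscan old.toList nw.toList s.toList := by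
  rw [strrepS s old nw ho, String.toList_ofList]

lemma multiF_fuel (K : List (List Char × List Char)) (hK : ∀ p ∈ K, p.1 ≠ []) :
    ∀ (fuel : Nat) (l : List Char), l.length ≤ fuel → multiF K fuel l = Mscan K l := by
  intro fuel
  induction fuel using Nat.strong_induction_on with
  | _ fuel ih =>
    intro l hl
    match fuel, l with
    | 0, l =>
      have : l = [] := by cases l <;> simp_all
      simp [this, multiF, Mscan]
    | f + 1, [] => simp [multiF, Mscan]
    | f + 1, c :: t =>
      have ht : t.length ≤ f := by simpa using hl
      show multiF K (f + 1) (c :: t) = multiF K (t.length + 1) (c :: t)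
      cases hf : K.find? (fun p => p.1.isPrefixOf (c :: t)) with
      | some kv =>
        obtain ⟨k, v⟩ := kv
        have hk : k ≠ [] := hK (k, v) (List.mem_of_find?_eq_some hf)
        have hol : 1 ≤ k.length := by cases k <;> simp_all
        simp only [multiF, hf]
        have hd : ((c :: t).drop k.length).length ≤ t.length := by
          simp [List.length_drop]; omega
        rw [ih f (by omega) _ (le_trans hd ht), ih t.length (by omega) _ hd]
      | none =>
        simp only [multiF, hf]
        rw [ih f (by omega) _ ht, ih t.length (by omega) _ le_rfl]

lemma Mscan_nil (K : List (List Char × List Char)) : Mscan K [] = [] := by simp [Mscan, multiF]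

lemma Mscan_cons (K : List (List Char × List Char)) (hK : ∀ p ∈ K, p.1 ≠ [])
    (c : Char) (t : List Char) :
    Mscan K (c :: t) =
      match K.find? (fun p => p.1.isPrefixOf (c :: t)) with
      | some (k, v) => v ++ Mscan K ((c :: t).drop k.length)
      | none => c :: Mscan K t := by
  show multiF K (t.length + 1) (c :: t) = _
  cases hf : K.find? (fun p => p.1.isPrefixOf (c :: t)) with
  | some kv =>
    obtain ⟨k, v⟩ := kv
    have hk : k ≠ [] := hK (k, v) (List.mem_of_find?_eq_some hf)
    have hol : 1 ≤ k.length := by cases k <;> simp_all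
    simp only [multiF, hf]
    rw [multiF_fuel K hK t.length _ (by simp [List.length_drop]; omega)]
  | none =>
    simp only [multiF, hf]
    rw [multiF_fuel K hK t.length _ le_rfl]

lemma Mscan_nilK : ∀ l : List Char, Mscan [] l = l := by
  intro l
  induction l with
  | nil => exact Mscan_nil []
  | cons c t ih => rw [Mscan_cons [] (by simp) c t]; simp [ih]

lemma not_prefix_append {a r x : List Char} (h1 : ¬ a <+: r) (h2 : ¬ r <+: a) :
    ¬ a <+: r ++ x :=
  fun h => (List.prefix_or_prefix_of_prefix h (List.prefix_append r x)).elim h1 h2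

-- scanning copies a '['-free block through unchanged
lemma Rscan_copy (ktail nw : List Char) :
    ∀ (y x : List Char), '[' ∉ y →
      Rscan ('[' :: ktail) nw (y ++ x) = y ++ Rscan ('[' :: ktail) nw x := by
  intro y
  induction y with
  | nil => simp
  | cons d y ih =>
    intro x hy
    have hd : d ≠ '[' := fun h => hy (by simp [h])
    have hy' : '[' ∉ y := fun h => hy (by simp [h])
    rw [List.cons_append, Rscan_cons _ _ (by simp) d (y ++ x)]
    have : ('[' :: ktail).isPrefixOf (d :: (y ++ x)) = false := by
      simp [List.isPrefixOf]
      intro h; exact absurd h.symm hd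
    rw [this]
    simp [ih x hy']

lemma Mscan_copy (K : List (List Char × List Char)) (hG : GoodK K) :
    ∀ (y x : List Char), '[' ∉ y → Mscan K (y ++ x) = y ++ Mscan K x := by
  have hK : ∀ p ∈ K, p.1 ≠ [] := by
    intro p hp
    have := (hG p hp).1
    cases h : p.1 <;> simp_all
  intro y
  induction y with
  | nil => simp
  | cons d y ih =>
    intro x hy
    have hd : d ≠ '[' := fun h => hy (by simp [h])
    have hy' : '[' ∉ y := fun h => hy (by simp [h])
    rw [List.cons_append, Mscan_cons K hK d (y ++ x)]
    have hnone : K.find? (fun p => p.1.isPrefixOf (d :: (y ++ x))) = none := by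
      rw [List.find?_eq_none]
      intro p hp
      have h1 := (hG p hp).1
      cases hpk : p.1 with
      | nil => simp [hpk] at h1
      | cons a as =>
        have : a = '[' := by simp [hpk] at h1; exact h1
        subst this
        simp [hpk, List.isPrefixOf]
        intro h; exact absurd h.symm hd
    rw [hnone]
    simp [ih x hy']

-- a '['-free prefix of a scanned string is a prefix of the original string
lemma prefix_Mscan (K : List (List Char × List Char)) (hG : GoodK K) :
    ∀ (n : Nat) (t k' : List Char), t.length ≤ n → '[' ∉ k' → k' <+: Mscan K t → k' <+: t := by
  have hK : ∀ p ∈ K, p.1 ≠ [] := by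
    intro p hp
    have := (hG p hp).1
    cases h : p.1 <;> simp_all
  intro n
  induction n with
  | zero =>
    intro t k' ht _ hp
    have : t = [] := by cases t <;> simp_all
    subst this
    rw [Mscan_nil] at hp
    simpa using hp
  | succ n ih =>
    intro t k' ht hk hp
    cases t with
    | nil => rw [Mscan_nil] at hp; simpa using hp
    | cons c u =>
      rw [Mscan_cons K hK c u] at hp
      cases hf : K.find? (fun p => p.1.isPrefixOf (c :: u)) with
      | some kv =>
        obtain ⟨k, v⟩ := kv
        rw [hf] at hp
        have h2 := (hG (k, v) (List.mem_of_find?_eq_some hf)).2.2.1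
        cases hv : v with
        | nil => simp [hv] at h2
        | cons b bs =>
          have hb : b = '[' := by simp [hv] at h2; exact h2
          subst hb
          cases k' with
          | nil => exact List.nil_prefix
          | cons d k'' =>
            rw [hv] at hp
            have := (List.cons_prefix_cons.mp (by simpa using hp)).1
            exact absurd this.symm (fun h => hk (by simp [← h]))
      | none =>
        rw [hf] at hp
        cases k' with
        | nil => exact List.nil_prefix
        | cons d k'' =>
          obtain ⟨hdc, hrest⟩ := List.cons_prefix_cons.mp hp
          subst hdc
          have hk'' : '[' ∉ k'' := fun h => hk (by simp [h])
          have := ih u k'' (by simpa using ht) hk'' hrest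
          exact List.cons_prefix_cons.mpr ⟨rfl, this⟩

-- the key new tag never fires inside a previously substituted replacement
lemma Rscan_over_repl (ktail nw rt x : List Char)
    (hrt : '[' ∉ rt)
    (h1 : ¬ ('[' :: ktail <+: '[' :: rt)) (h2 : ¬ ('[' :: rt <+: '[' :: ktail)) :
    Rscan ('[' :: ktail) nw (('[' :: rt) ++ x) = ('[' :: rt) ++ Rscan ('[' :: ktail) nw x := by
  rw [List.cons_append, Rscan_cons _ _ (by simp) '[' (rt ++ x)]
  have hnp : ('[' :: ktail).isPrefixOf ('[' :: (rt ++ x)) = false := by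
    rw [Bool.eq_false_iff]
    intro h
    have := List.isPrefixOf_iff_prefix.mp h
    rw [show ('[' :: (rt ++ x)) = ('[' :: rt) ++ x from rfl] at this
    exact not_prefix_append h1 h2 this
  rw [hnp]
  simp [Rscan_copy ktail nw rt x hrt]

-- MAIN STEP: one more sequential replace pass folds into the multi-scan
lemma step_key (K : List (List Char × List Char)) (ktail rtail : List Char)
    (hG : GoodK K) (hkt : '[' ∉ ktail) (hrt : '[' ∉ rtail)
    (h3 : ∀ p ∈ K, ¬ ('[' :: ktail <+: p.2) ∧ ¬ (p.2 <+: '[' :: ktail)) :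
    ∀ l, Rscan ('[' :: ktail) ('[' :: rtail) (Mscan K l) =
      Mscan (K ++ [('[' :: ktail, '[' :: rtail)]) l := by
  have hK : ∀ p ∈ K, p.1 ≠ [] := by
    intro p hp
    have := (hG p hp).1
    cases h : p.1 <;> simp_all
  have hK' : ∀ p ∈ K ++ [('[' :: ktail, '[' :: rtail)], p.1 ≠ [] := by
    intro p hp
    rcases List.mem_append.mp hp with h | h
    · exact hK p h
    · simp at h; subst h; simp
  suffices H : ∀ (n : Nat) (l : List Char), l.length ≤ n →
      Rscan ('[' :: ktail) ('[' :: rtail) (Mscan K l) =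
        Mscan (K ++ [('[' :: ktail, '[' :: rtail)]) l by
    intro l; exact H l.length l le_rfl
  intro n
  induction n with
  | zero =>
    intro l hl
    have : l = [] := by cases l <;> simp_all
    subst this
    simp [Mscan_nil, Rscan_nil]
  | succ n ih =>
    intro l hl
    cases l with
    | nil => simp [Mscan_nil, Rscan_nil]
    | cons c t =>
      rw [Mscan_cons K hK c t, Mscan_cons _ hK' c t, List.find?_append]
      cases hf : K.find? (fun p => p.1.isPrefixOf (c :: t)) with
      | some kv =>
        obtain ⟨k, v⟩ := kv
        have hmem := List.mem_of_find?_eq_some hf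
        have hGp := hG (k, v) hmem
        have h3p := h3 (k, v) hmem
        have hkne : k ≠ [] := hK (k, v) hmem
        have hol : 1 ≤ k.length := by cases k <;> simp_all
        simp only [Option.or]
        cases hv : v with
        | nil => rw [hv] at hGp; simp at hGp
        | cons b bs =>
          have hb : b = '[' := by rw [hv] at hGp; simpa using hGp.2.2.1
          subst hb
          have hbs : '[' ∉ bs := by rw [hv] at hGp; simpa using hGp.2.2.2
          rw [hv] at h3p
          have hlen : ((c :: t).drop k.length).length ≤ n := by
            simp [List.length_drop] at *
            omega
          rw [Rscan_over_repl ktail ('[' :: rtail) bs _ hbs h3p.1 h3p.2,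
            ih _ hlen]
      | none =>
        simp only [Option.or]
        by_cases hp : ('[' :: ktail).isPrefixOf (c :: t)
        · -- the new tag matches here
          have hpre := List.isPrefixOf_iff_prefix.mp hp
          obtain ⟨hc, htail⟩ := List.cons_prefix_cons.mp hpre
          subst hc
          obtain ⟨rest, hrest⟩ := htail
          have hfind' : List.find? (fun p => p.1.isPrefixOf ('[' :: t))
              [('[' :: ktail, '[' :: rtail)] = some ('[' :: ktail, '[' :: rtail) := by
            simp [List.find?, hp]
          rw [hfind']
          simp only [Option.none_or]
          subst hrest
          rw [Mscan_copy K hG ktail rest hkt]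
          rw [Rscan_cons ('[' :: ktail) ('[' :: rtail) (by simp) '[' (ktail ++ Mscan K rest)]
          have hpt : ('[' :: ktail).isPrefixOf ('[' :: (ktail ++ Mscan K rest)) = true :=
            List.isPrefixOf_iff_prefix.mpr (List.cons_prefix_cons.mpr ⟨rfl, List.prefix_append _ _⟩)
          rw [hpt]
          simp only [if_true]
          have hdrop1 : ('[' :: (ktail ++ Mscan K rest)).drop ('[' :: ktail).length
              = Mscan K rest := by simp
          have hdrop2 : ('[' :: (ktail ++ rest)).drop ('[' :: ktail).length = rest := by simp
          have hlen : rest.length ≤ n := by simp at hl; omega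
          rw [hdrop1, hdrop2, ih rest hlen]
        · -- nothing matches here
          have hfind' : List.find? (fun p => p.1.isPrefixOf (c :: t))
              [('[' :: ktail, '[' :: rtail)] = none := by
            simp [List.find?, hp]
          rw [hfind']
          simp only [Option.none_or]
          have hlen : t.length ≤ n := by simpa using hl
          have hnp : ('[' :: ktail).isPrefixOf (c :: Mscan K t) = false := by
            rw [Bool.eq_false_iff]
            intro h
            obtain ⟨hc, htl⟩ := List.cons_prefix_cons.mp (List.isPrefixOf_iff_prefix.mp h)
            subst hc
            have : ktail <+: t := prefix_Mscan K hG t.length t ktail le_rfl hkt htl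
            exact hp (List.isPrefixOf_iff_prefix.mpr (List.cons_prefix_cons.mpr ⟨rfl, this⟩))
          rw [Rscan_cons _ _ (by simp), hnp]
          simp only [Bool.false_eq_true, if_false]
          rw [ih t hlen]

-- the six tag pairs with explicit '[' heads
def K6 : List (List Char × List Char) := pvTags.map (fun p => ('[' :: p.1, '[' :: p.2))

-- A's six replace passes compose into the single multi-scan
lemma chain (l : List Char) :
    Rscan ('[' :: "Post-Chorus".toList) ('[' :: "Post-chœur".toList)
      (Rscan ('[' :: "Pre-Chorus".toList) ('[' :: "Pré-chœur".toList)
        (Rscan ('[' :: "Bridge".toList) ('[' :: "Pont".toList)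
          (Rscan ('[' :: "Chorus".toList) ('[' :: "Chœur".toList)
            (Rscan ('[' :: "Verse".toList) ('[' :: "Couplet".toList)
              (Rscan ('[' :: "Hook".toList) ('[' :: "Accroche".toList) l))))) = Mscan K6 l := by
  have s1 := step_key [] "Hook".toList "Accroche".toList (by unfold GoodK; decide) (by decide) (by decide) (by decide)
  have s2 := step_key [('[' :: "Hook".toList, '[' :: "Accroche".toList)]
    "Verse".toList "Couplet".toList (by unfold GoodK; decide) (by decide) (by decide) (by decide)
  have s3 := step_key [('[' :: "Hook".toList, '[' :: "Accroche".toList),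
    ('[' :: "Verse".toList, '[' :: "Couplet".toList)]
    "Chorus".toList "Chœur".toList (by unfold GoodK; decide) (by decide) (by decide) (by decide)
  have s4 := step_key [('[' :: "Hook".toList, '[' :: "Accroche".toList),
    ('[' :: "Verse".toList, '[' :: "Couplet".toList),
    ('[' :: "Chorus".toList, '[' :: "Chœur".toList)]
    "Bridge".toList "Pont".toList (by unfold GoodK; decide) (by decide) (by decide) (by decide)
  have s5 := step_key [('[' :: "Hook".toList, '[' :: "Accroche".toList),
    ('[' :: "Verse".toList, '[' :: "Couplet".toList),
    ('[' :: "Chorus".toList, '[' :: "Chœur".toList),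
    ('[' :: "Bridge".toList, '[' :: "Pont".toList)]
    "Pre-Chorus".toList "Pré-chœur".toList (by unfold GoodK; decide) (by decide) (by decide) (by decide)
  have s6 := step_key [('[' :: "Hook".toList, '[' :: "Accroche".toList),
    ('[' :: "Verse".toList, '[' :: "Couplet".toList),
    ('[' :: "Chorus".toList, '[' :: "Chœur".toList),
    ('[' :: "Bridge".toList, '[' :: "Pont".toList),
    ('[' :: "Pre-Chorus".toList, '[' :: "Pré-chœur".toList)]
    "Post-Chorus".toList "Post-chœur".toList (by unfold GoodK; decide) (by decide) (by decide) (by decide)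
  conv_lhs => rw [← Mscan_nilK l]
  rw [s1]
  simp only [List.nil_append, List.cons_append, List.singleton_append] at *
  rw [s2, s3, s4, s5, s6]
  congr 1

-- B's scan is the multi-scan
lemma bScan_eq_Mscan : ∀ (n : Nat) (l : List Char), l.length ≤ n → bScan l = Mscan K6 l := by
  have hK : ∀ p ∈ K6, p.1 ≠ [] := by decide
  intro n
  induction n with
  | zero =>
    intro l hl
    have : l = [] := by cases l <;> simp_all
    subst this
    simp [bScan, Mscan_nil]
  | succ n ih =>
    intro l hl
    cases l with
    | nil => simp [bScan, Mscan_nil]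
    | cons c t =>
      have hlt : t.length ≤ n := by simpa using hl
      rw [Mscan_cons K6 hK c t, bScan]
      by_cases hc : c = '['
      · subst hc
        have hmap : K6.find? (fun p => p.1.isPrefixOf ('[' :: t)) =
            (pvTags.find? (fun p => p.1.isPrefixOf t)).map
              (fun p => ('[' :: p.1, '[' :: p.2)) := by
          rw [K6, List.find?_map]
          congr 1
        rw [hmap]
        cases hf : pvTags.find? (fun p => p.1.isPrefixOf t) with
        | some kv =>
          obtain ⟨k, v⟩ := kv
          simp only [Option.map_some, if_true]
          have hdrop : ('[' :: t).drop ('[' :: k).length = t.drop k.length := by simp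
          rw [hdrop]
          have hlen : (t.drop k.length).length ≤ n := by
            simp [List.length_drop]; omega
          simp [ih _ hlen]
        | none =>
          simp only [Option.map_none, if_true]
          simp [ih t hlt]
      · have hnone : K6.find? (fun p => p.1.isPrefixOf (c :: t)) = none := by
          rw [List.find?_eq_none]
          intro p hp
          rw [K6, List.mem_map] at hp
          obtain ⟨q, _, hq⟩ := hp
          subst hq
          simp [List.isPrefixOf]
          intro h; exact absurd h.symm hc
        rw [hnone]
        simp [hc, ih t hlt]

-- A unfolded to the chain of scans
lemma A_eq_chain (s : String) :
    ligneFormatage s = String.ofList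
      (Rscan "[Post-Chorus".toList "[Post-chœur".toList
        (Rscan "[Pre-Chorus".toList "[Pré-chœur".toList
          (Rscan "[Bridge".toList "[Pont".toList
            (Rscan "[Chorus".toList "[Chœur".toList
              (Rscan "[Verse".toList "[Couplet".toList
                (Rscan "[Hook".toList "[Accroche".toList s.toList)))))) := by
  simp only [ligneFormatage, List.foldl]
  rw [strrepS _ _ _ (by decide)]
  rw [strrepT _ _ _ (by decide), strrepT _ _ _ (by decide), strrepT _ _ _ (by decide),
    strrepT _ _ _ (by decide), strrepT _ _ _ (by decide)]

lemma final_eq (s : String) : ligneFormatage s = ligneFormatage_alt s := by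
  rw [A_eq_chain s, ligneFormatage_alt, bScan_eq_Mscan s.toList.length s.toList le_rfl,
    ← chain s.toList]
  simp only [show "[Hook".toList = '[' :: "Hook".toList from by decide,
    show "[Accroche".toList = '[' :: "Accroche".toList from by decide,
    show "[Verse".toList = '[' :: "Verse".toList from by decide,
    show "[Couplet".toList = '[' :: "Couplet".toList from by decide,
    show "[Chorus".toList = '[' :: "Chorus".toList from by decide,
    show "[Chœur".toList = '[' :: "Chœur".toList from by decide,
    show "[Bridge".toList = '[' :: "Bridge".toList from by decide,
    show "[Pont".toList = '[' :: "Pont".toList from by decide,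
    show "[Pre-Chorus".toList = '[' :: "Pre-Chorus".toList from by decide,
    show "[Pré-chœur".toList = '[' :: "Pré-chœur".toList from by decide,
    show "[Post-Chorus".toList = '[' :: "Post-Chorus".toList from by decide,
    show "[Post-chœur".toList = '[' :: "Post-chœur".toList from by decide]

-- ===== VERDICT (by name: the statement is the Claim_ definition above) =====
theorem ligneFormatage_spec : Claim_equal_ligneFormatage := by
  intro ligne _
  unfold Spec_ligneFormatage
  exact final_eq ligne
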